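-- pv_equiv track=rewrite | github.com/pypi-data/pypi-mirror-256 | packages/kishu/kishu-0.2.0-cp38-cp38-macosx_12_0_arm64.whl/kishu/planning/change.py | find_created_and_deleted_vars
-- ===== SOURCE A (Python) =====
-- from typing import Any, Deque, Dict, Set, Tuple
--
-- def find_created_and_deleted_vars(pre_execution: Set[str], post_execution: Set[str]) -> Tuple[Set[str], Set[str]]:
--     """
--         Find created and deleted variables through computing a difference of the user namespace pre and post execution.
--     """
--     created_variables = set()
--     deleted_variables = set()
--
--     # New variables
--     for varname in post_execution.difference(pre_execution):
--         if not varname.startswith('_'):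
--             created_variables.add(varname)
--
--     # Deleted variables
--     for varname in pre_execution.difference(post_execution):
--         if not varname.startswith('_'):
--             deleted_variables.add(varname)
--
--     return created_variables, deleted_variables
-- ===== SOURCE B (Python) =====
-- def find_created_and_deleted_vars(pre_execution, post_execution):
--     """
--         Find created and deleted variables through computing a difference of the user namespace pre and post execution.
--     """
--     # Mark every name in one hash map instead of computing set differences:
--     # "pre" = seen only before, "post" = seen only after, "both" = unchanged.
--     status = {}
--     for varname in pre_execution:
--         status[varname] = "pre"
--     for varname in post_execution:
--         status[varname] = "both" if varname in status else "post"
--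
--     created_variables = {v for v, s in status.items() if s == "post" and not v.startswith("_")}
--     deleted_variables = {v for v, s in status.items() if s == "pre" and not v.startswith("_")}
--     return created_variables, deleted_variables
-- ===== Notes on version B (the rewrite author's own statement) =====
-- stated objective: alternative
-- what changed: A computes two set differences and filters each in its own loop; B never forms a difference: it tags every name in one dict (pre/post/both) over two insert passes and reads the created/deleted sets off the dict items.
import Mathlib
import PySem

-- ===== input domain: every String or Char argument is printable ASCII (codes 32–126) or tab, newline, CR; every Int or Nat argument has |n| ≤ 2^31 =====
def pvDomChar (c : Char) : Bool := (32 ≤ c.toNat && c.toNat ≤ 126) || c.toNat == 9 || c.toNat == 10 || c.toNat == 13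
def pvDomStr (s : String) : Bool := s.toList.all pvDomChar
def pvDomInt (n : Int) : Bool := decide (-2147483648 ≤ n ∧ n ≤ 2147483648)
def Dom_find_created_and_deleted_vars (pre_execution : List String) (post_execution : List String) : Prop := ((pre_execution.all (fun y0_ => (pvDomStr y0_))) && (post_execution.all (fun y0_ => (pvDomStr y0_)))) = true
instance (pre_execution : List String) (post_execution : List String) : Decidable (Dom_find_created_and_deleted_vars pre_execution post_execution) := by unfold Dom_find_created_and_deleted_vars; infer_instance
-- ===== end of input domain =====

-- B replaces A's two set differences + two filter loops with a single dict that tags each name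
-- "pre"/"post"/"both" over two insert passes, then reads both result sets off the dict items
-- (alternative decomposition, same cost).

-- ===== PORT A =====
-- created: for varname in post.difference(pre): if not varname.startswith('_'): created.add(varname)
def find_created_and_deleted_vars (pre_execution : List String) (post_execution : List String) : List String × List String :=
  let created_variables : PySem.Set String :=
    (PySem.Set.diff post_execution pre_execution).foldl
      (fun s v => if !(PySem.Str.startswith v "_") then PySem.Set.add s v else s)
      PySem.Set.empty
  let deleted_variables : PySem.Set String :=
    (PySem.Set.diff pre_execution post_execution).foldl
      (fun s v => if !(PySem.Str.startswith v "_") then PySem.Set.add s v else s)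
      PySem.Set.empty
  (created_variables, deleted_variables)

-- ===== PORT B =====
-- status = {}; for v in pre: status[v] = "pre"; for v in post: status[v] = "both" if v in status else "post";
-- then the two set comprehensions over status.items()
def find_created_and_deleted_vars_alt (pre_execution : List String) (post_execution : List String) : List String × List String :=
  let status0 : PySem.Dict String String :=
    pre_execution.foldl (fun d v => d.insert v "pre") PySem.Dict.empty
  let status : PySem.Dict String String :=
    post_execution.foldl (fun d v => d.insert v (if d.contains v then "both" else "post")) status0
  let created_variables : PySem.Set String :=
    PySem.Set.ofList
      (((status.items.filter (fun p => p.2 == "post" && !(PySem.Str.startswith p.1 "_"))).map (·.1)))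
  let deleted_variables : PySem.Set String :=
    PySem.Set.ofList
      (((status.items.filter (fun p => p.2 == "pre" && !(PySem.Str.startswith p.1 "_"))).map (·.1)))
  (created_variables, deleted_variables)

-- ===== PRECONDITION & SPEC =====
-- The Python arguments are sets; under the type convention a set is a list of its DISTINCT
-- elements, so Pre_ states exactly that encoding (Nodup) and is not a narrowing of A's domain.
def Pre_find_created_and_deleted_vars (pre_execution : List String) (post_execution : List String) : Prop :=
  pre_execution.Nodup ∧ post_execution.Nodup
instance (pre_execution : List String) (post_execution : List String) : Decidable (Pre_find_created_and_deleted_vars pre_execution post_execution) := by unfold Pre_find_created_and_deleted_vars; infer_instance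

def pvWitness_find_created_and_deleted_vars : List String × List String := (["x", "_h", "y"], ["y", "z", "_k"])

def Spec_find_created_and_deleted_vars (pre_execution : List String) (post_execution : List String) (out : List String × List String) : Prop := out = find_created_and_deleted_vars_alt pre_execution post_execution
instance (pre_execution : List String) (post_execution : List String) (out : List String × List String) : Decidable (Spec_find_created_and_deleted_vars pre_execution post_execution out) := by unfold Spec_find_created_and_deleted_vars; infer_instance

-- ===== CLAIM (what is proved, stated in full; the proofs are below) =====
def Claim_equal_find_created_and_deleted_vars : Prop := ∀ (pre_execution : List String) (post_execution : List String), Dom_find_created_and_deleted_vars pre_execution post_execution → Pre_find_created_and_deleted_vars pre_execution post_execution → Spec_find_created_and_deleted_vars pre_execution post_execution (find_created_and_deleted_vars pre_execution post_execution)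

-- ===== LEMMAS AND PROOFS =====

-- the pre pass: every key looked up is "pre" if it is in pre, untouched otherwise (no Nodup needed)
theorem get?_pre_fold (pre : List String) (d : PySem.Dict String String) (v : String) :
    (pre.foldl (fun d v => d.insert v "pre") d).get? v
      = if v ∈ pre then some "pre" else d.get? v := by
  induction pre generalizing d with
  | nil => simp
  | cons x xs ih =>
    simp only [List.foldl_cons, ih, List.mem_cons]
    rw [PySem.Dict.get?_insert]
    by_cases hvx : v = x <;> by_cases hvxs : v ∈ xs <;> simp [hvx, hvxs]

-- the post pass: final lookup of any key, assuming post has no duplicates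
theorem get?_post_fold (post : List String) (hpost : post.Nodup) (d : PySem.Dict String String) (v : String) :
    (post.foldl (fun d v => d.insert v (if d.contains v then "both" else "post")) d).get? v
      = if v ∈ post then some (if d.contains v then "both" else "post") else d.get? v := by
  induction post generalizing d with
  | nil => simp
  | cons x xs ih =>
    have hx : x ∉ xs := (List.nodup_cons.mp hpost).1
    have hxs : xs.Nodup := (List.nodup_cons.mp hpost).2
    simp only [List.foldl_cons, ih hxs, List.mem_cons]
    by_cases hvxs : v ∈ xs
    · have hvx : v ≠ x := fun h => hx (h ▸ hvxs)
      rw [PySem.Dict.contains_insert]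
      simp [hvxs, hvx]
    · rw [PySem.Dict.get?_insert]
      by_cases hvx : v = x
      · subst hvx; simp [hvxs]
      · simp [hvx, hvxs]

-- A's filter-into-a-fresh-set loop over a duplicate-free list disjoint from the accumulator is append-of-filter
theorem foldl_add_if_eq_filter (p : String → Bool) (l : List String) (hl : l.Nodup)
    (acc : PySem.Set String) (hdis : ∀ v ∈ l, v ∉ acc) :
    l.foldl (fun s v => if p v then PySem.Set.add s v else s) acc = acc ++ l.filter p := by
  induction l generalizing acc with
  | nil => simp
  | cons x xs ih =>
    have hx : x ∉ xs := (List.nodup_cons.mp hl).1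
    have hxs : xs.Nodup := (List.nodup_cons.mp hl).2
    simp only [List.foldl_cons, List.filter_cons]
    by_cases hp : p x
    · rw [hp, if_pos rfl, PySem.Set.add_of_not_mem (hdis x (List.mem_cons_self ..))]
      rw [ih hxs (acc ++ [x]) (fun v hv => by
        simp only [List.mem_append, List.mem_singleton]
        rintro (h | rfl)
        · exact hdis v (List.mem_cons_of_mem _ hv) h
        · exact hx hv)]
      simp
    · rw [Bool.not_eq_true] at hp
      rw [hp, if_neg (by simp)]
      exact ih hxs acc (fun v hv => hdis v (List.mem_cons_of_mem _ hv))


-- the status dict after both passes: lookup table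
theorem status_get? (pre post : List String) (hpostN : post.Nodup) (v : String) :
    (post.foldl (fun d v => d.insert v (if d.contains v then "both" else "post"))
       (pre.foldl (fun d v => d.insert v "pre") PySem.Dict.empty)).get? v
      = if v ∈ post then some (if v ∈ pre then "both" else "post")
        else if v ∈ pre then some "pre" else none := by
  rw [get?_post_fold post hpostN]
  rw [PySem.Dict.contains_eq_isSome_get?, get?_pre_fold]
  by_cases h1 : v ∈ post <;> by_cases h2 : v ∈ pre <;>
    simp [h1, h2, PySem.Dict.get?_empty]

-- the status dict's keys: pre first, then the genuinely new names of post in order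
theorem status_keys (pre post : List String) (hpreN : pre.Nodup) (hpostN : post.Nodup) :
    (post.foldl (fun d v => d.insert v (if d.contains v then "both" else "post"))
       (pre.foldl (fun d v => d.insert v "pre") PySem.Dict.empty)).keys
      = pre ++ post.filter (fun y => !(PySem.Set.contains pre y)) := by
  rw [PySem.Dict.keys_foldl_insert, PySem.Dict.keys_foldl_insert]
  rw [PySem.Dict.keys_empty, PySem.Set.update_nil_left,
      PySem.Set.ofList_eq_self_of_nodup pre hpreN, PySem.Set.update_eq_append_filter,
      PySem.Set.ofList_eq_self_of_nodup post hpostN]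

theorem status_keys_nodup (pre post : List String) :
    (post.foldl (fun d v => d.insert v (if d.contains v then "both" else "post"))
       (pre.foldl (fun d v => d.insert v "pre") PySem.Dict.empty)).keys.Nodup := by
  exact PySem.Dict.nodup_keys_foldl_insert _ _ _
    (PySem.Dict.nodup_keys_foldl_insert _ _ _ PySem.Dict.nodup_keys_empty)

-- ===== VERDICT (by name: the statement is the Claim_ definition above) =====
theorem find_created_and_deleted_vars_spec : Claim_equal_find_created_and_deleted_vars := by
  intro pre post _ hpre
  obtain ⟨hpreN, hpostN⟩ := hpre
  unfold Spec_find_created_and_deleted_vars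
  unfold find_created_and_deleted_vars find_created_and_deleted_vars_alt
  simp only
  set st := (post.foldl (fun d v => d.insert v (if d.contains v then "both" else "post"))
       (pre.foldl (fun d v => d.insert v "pre") PySem.Dict.empty)) with hst
  -- the status items, fully evaluated
  have hitems : st.items
      = (pre ++ post.filter (fun y => !(PySem.Set.contains pre y))).map
          (fun k => (k, if k ∈ post then (if k ∈ pre then "both" else "post")
                        else if k ∈ pre then "pre" else "")) := by
    rw [PySem.Dict.items_eq_map_keys st (status_keys_nodup pre post) "", hst,
        status_keys pre post hpreN hpostN]
    refine List.map_congr_left (fun k _ => ?_)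
    rw [PySem.Dict.getD_eq_get?_getD, status_get? pre post hpostN k]
    by_cases h1 : k ∈ post <;> by_cases h2 : k ∈ pre <;> simp [h1, h2]
  rw [hitems]
  -- push filter/map through the map over keys
  rw [List.filter_map, List.filter_map, List.map_map, List.map_map]
  simp only [Function.comp_def, List.map_id']
  rw [List.filter_append, List.filter_append]
  -- evaluate the four filtered pieces
  have hcre_pre : pre.filter (fun k =>
      ((if k ∈ post then (if k ∈ pre then "both" else "post")
        else if k ∈ pre then "pre" else "") == "post") && !(PySem.Str.startswith k "_")) = [] := by
    refine List.filter_eq_nil_iff.mpr (fun k hk => ?_)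
    by_cases h1 : k ∈ post <;> simp [h1, hk]
  have hdel_post : (post.filter (fun y => !(PySem.Set.contains pre y))).filter (fun k =>
      ((if k ∈ post then (if k ∈ pre then "both" else "post")
        else if k ∈ pre then "pre" else "") == "pre") && !(PySem.Str.startswith k "_")) = [] := by
    refine List.filter_eq_nil_iff.mpr (fun k hk => ?_)
    have h1 : k ∈ post := (List.mem_filter.mp hk).1
    have h2 : k ∉ pre := by
      have := (List.mem_filter.mp hk).2
      simpa using this
    simp [h1, h2]
  have hcre_post : (post.filter (fun y => !(PySem.Set.contains pre y))).filter (fun k =>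
      ((if k ∈ post then (if k ∈ pre then "both" else "post")
        else if k ∈ pre then "pre" else "") == "post") && !(PySem.Str.startswith k "_"))
      = (post.filter (fun y => !(PySem.Set.contains pre y))).filter
          (fun k => !(PySem.Str.startswith k "_")) := by
    refine List.filter_congr (fun k hk => ?_)
    have h1 : k ∈ post := (List.mem_filter.mp hk).1
    have h2 : k ∉ pre := by
      have := (List.mem_filter.mp hk).2
      simpa using this
    simp [h1, h2]
  have hdel_pre : pre.filter (fun k =>
      ((if k ∈ post then (if k ∈ pre then "both" else "post")
        else if k ∈ pre then "pre" else "") == "pre") && !(PySem.Str.startswith k "_"))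
      = pre.filter (fun k => !(PySem.Set.contains post k) && !(PySem.Str.startswith k "_")) := by
    refine List.filter_congr (fun k hk => ?_)
    by_cases h1 : k ∈ post <;> simp [h1, hk]
  rw [hcre_pre, hdel_post, hcre_post, hdel_pre]
  simp only [List.nil_append, List.append_nil]
  -- B's two lists are duplicate-free, so Set.ofList is the identity on them
  rw [PySem.Set.ofList_eq_self_of_nodup _ ((hpostN.filter _).filter _),
      PySem.Set.ofList_eq_self_of_nodup _ (hpreN.filter _)]
  -- A's two loops are filters of the two set differences
  rw [foldl_add_if_eq_filter _ _ (PySem.Set.nodup_diff post pre hpostN) PySem.Set.empty (by simp [PySem.Set.empty]),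
      foldl_add_if_eq_filter _ _ (PySem.Set.nodup_diff pre post hpreN) PySem.Set.empty (by simp [PySem.Set.empty])]
  show ((PySem.Set.diff post pre).filter _, (PySem.Set.diff pre post).filter _) = _
  have hdiff : ∀ (s t : List String),
      PySem.Set.diff s t = s.filter (fun x => !(PySem.Set.contains t x)) := fun _ _ => rfl
  rw [hdiff, hdiff, List.filter_filter]
  refine Prod.ext rfl ?_
  simp only [List.filter_filter]
  exact List.filter_congr (fun k _ => Bool.and_comm _ _)
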